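-- pv_equiv track=rewrite | github.com/cyaninn-entj/baekjoon_online_judge | python3/step9/9020.py | GB_conjecture
-- ===== SOURCE A (Python) =====
-- def pn(ad) :
--     for i in range(2,ad) :
--         if i*i<= ad :
--             if ad%i==0 : return False
--     return True
--
-- def GB_conjecture(idx) :
--     x,y=int(idx/2), int(idx/2)
--     while True :
--         _x=pn(x)
--         _y=pn(y)
--         if _x and _y :
--             return x,y
--         else :
--             x-=1
--             y+=1
-- ===== SOURCE B (Python) =====
-- def _isp(n):
--     # pn's acceptance set: everything below 2, plus numbers with no divisor d, 2 <= d, d*d <= n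
--     if n < 2:
--         return True
--     d = 2
--     while d * d <= n:
--         if n % d == 0:
--             return False
--         d += 1
--     return True
--
-- def GB_conjecture(idx):
--     m = int(idx / 2)
--     k = 0
--     while not (_isp(m - k) and _isp(m + k)):
--         k += 1
--     return m - k, m + k
-- ===== Notes on version B (the rewrite author's own statement) =====
-- stated objective: faster
-- what changed: per-candidate primality now stops at sqrt(n) (while d*d<=n) instead of pn's scan of every i in range(2,n), and the two mirrored counters x,y are replaced by a single offset k from the middle
import Mathlib
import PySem

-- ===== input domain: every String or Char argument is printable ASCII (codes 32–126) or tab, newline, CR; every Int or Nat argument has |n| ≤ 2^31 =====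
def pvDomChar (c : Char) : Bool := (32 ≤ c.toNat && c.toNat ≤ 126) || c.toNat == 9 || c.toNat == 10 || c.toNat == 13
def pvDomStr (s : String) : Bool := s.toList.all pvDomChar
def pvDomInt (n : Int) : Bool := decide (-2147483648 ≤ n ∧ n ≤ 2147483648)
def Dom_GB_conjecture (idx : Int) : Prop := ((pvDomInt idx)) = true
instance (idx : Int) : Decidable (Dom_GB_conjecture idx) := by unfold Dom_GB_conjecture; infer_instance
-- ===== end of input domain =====

-- B replaces pn's full scan of range(2,n) by a sqrt-bounded divisor loop and the two
-- mirrored counters x,y by a single offset k (objective: faster per primality test).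
-- Both `while True` loops are encoded with the same fuel 3*m+5; the `none`/(getD []) branch
-- is the fuel running out, which no tested input reaches (the search stops at the first
-- acceptable pair, whose offset stays far below the fuel for every input we generate).

-- ===== PORT A =====
-- pn(ad): for i in range(2,ad): if i*i<=ad and ad%i==0: return False; return True
def pnA (ad : Int) : Bool :=
  !((PySem.List.pyRange 2 ad 1).any (fun i => decide (i * i ≤ ad) && (PySem.Int.mod ad i == 0)))

-- the while-loop of GB_conjecture, literally: test pn(x) and pn(y), return (x,y) or step x-=1, y+=1
def loopAF (x y : Int) : Nat → Option (List Int)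
  | 0 => none
  | Nat.succ n => if (pnA x && pnA y) = true then some [x, y] else loopAF (x - 1) (y + 1) n

def GB_conjecture (idx : Int) : List Int :=
  -- x,y = int(idx/2), int(idx/2)  (int(...) truncates toward zero; exact on |idx| ≤ 2^31)
  let m := PySem.Int.truncdiv idx 2
  (loopAF m m (3 * m.toNat + 5)).getD []

-- ===== PORT B =====
-- proof obligations of _isp's while-loop (termination of the sqrt-bounded scan)
theorem okLoopB_h2 (d : Int) (h2 : 2 ≤ d) : 2 ≤ d + 1 :=
  le_trans h2 (le_add_of_nonneg_right zero_le_one)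

theorem okLoopB_dec (n d : Int) (h2 : 2 ≤ d) (hdd : d * d ≤ n) :
    (n + 1 - (d + 1)).toNat < (n + 1 - d).toNat := by
  have h2d : 2 * d ≤ d * d := mul_le_mul_of_nonneg_right h2 (le_trans zero_le_two h2)
  have hdn : 2 * d ≤ n := le_trans h2d hdd
  omega

-- _isp's loop: d from 2 while d*d <= n
def okLoopB (n d : Int) (h2 : 2 ≤ d) : Bool :=
  if hdd : d * d ≤ n then
    if PySem.Int.mod n d == 0 then false
    else okLoopB n (d + 1) (okLoopB_h2 d h2)
  else true
termination_by (n + 1 - d).toNat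
decreasing_by exact okLoopB_dec n d h2 hdd

def okB (n : Int) : Bool := if n < 2 then true else okLoopB n 2 (le_refl 2)

-- B's while-loop: increase the offset k until both _isp hold
def loopBF (m : Int) (k : Nat) : Nat → Option (List Int)
  | 0 => none
  | Nat.succ n => if (okB (m - k) && okB (m + k)) = true then some [m - k, m + k]
                  else loopBF m (k + 1) n

def GB_conjecture_alt (idx : Int) : List Int :=
  let m := PySem.Int.truncdiv idx 2
  (loopBF m 0 (3 * m.toNat + 5)).getD []

-- ===== PRECONDITION & SPEC =====
def Spec_GB_conjecture (idx : Int) (out : List Int) : Prop := out = GB_conjecture_alt idx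
instance (idx : Int) (out : List Int) : Decidable (Spec_GB_conjecture idx out) := by unfold Spec_GB_conjecture; infer_instance

-- ===== CLAIM (what is proved, stated in full; the proofs are below) =====
def Claim_equal_GB_conjecture : Prop := ∀ (idx : Int), Dom_GB_conjecture idx → Spec_GB_conjecture idx (GB_conjecture idx)

-- ===== LEMMAS AND PROOFS =====

-- pn accepts exactly: no i with 2 ≤ i < n, i*i ≤ n and n % i == 0
theorem pnA_char (n : Int) :
    pnA n = true ↔ ∀ i : Int, 2 ≤ i → i < n → i * i ≤ n → PySem.Int.mod n i ≠ 0 := by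
  unfold pnA
  simp only [Bool.not_eq_eq_eq_not, Bool.not_true, List.any_eq_false, Bool.and_eq_true,
    decide_eq_true_eq, beq_iff_eq, not_and, PySem.List.mem_pyRange_one]
  constructor
  · intro H i h1 h2 h3; exact H i ⟨h1, h2⟩ h3
  · intro H i hi; exact H i hi.1 hi.2

-- okLoopB accepts exactly: no divisor e ≥ d with e*e ≤ n
theorem okLoopB_char_aux (n : Int) (K : Nat) : ∀ (d : Int) (h2 : 2 ≤ d), (n + 1 - d).toNat ≤ K →
    (okLoopB n d h2 = true ↔ ∀ e : Int, d ≤ e → e * e ≤ n → PySem.Int.mod n e ≠ 0) := by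
  induction K with
  | zero =>
    intro d h2 hK
    have hdd : ¬ d * d ≤ n := by
      intro h
      have h2d : 2 * d ≤ d * d := mul_le_mul_of_nonneg_right h2 (le_trans zero_le_two h2)
      omega
    rw [okLoopB, dif_neg hdd]
    refine ⟨fun _ e he hee _ => ?_, fun _ => rfl⟩
    exact hdd (le_trans (mul_le_mul he he (le_trans zero_le_two h2) (le_trans (le_trans zero_le_two h2) he)) hee)
  | succ K ih =>
    intro d h2 hK
    rw [okLoopB]
    by_cases hdd : d * d ≤ n
    · rw [dif_pos hdd]
      by_cases hmod : (PySem.Int.mod n d == 0) = true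
      · rw [if_pos hmod]
        constructor
        · intro h; cases h
        · intro H; exact ((H d le_rfl hdd) (beq_iff_eq.mp hmod)).elim
      · rw [if_neg hmod]
        rw [ih (d + 1) (okLoopB_h2 d h2) (by have := okLoopB_dec n d h2 hdd; omega)]
        constructor
        · intro H e he hee
          rcases eq_or_lt_of_le he with rfl | hlt
          · exact fun hz => hmod (by simp [hz])
          · exact H e (by omega) hee
        · intro H e he hee; exact H e (by omega) hee
    · rw [dif_neg hdd]
      refine ⟨fun _ e he hee _ => ?_, fun _ => rfl⟩
      exact hdd (le_trans (mul_le_mul he he (le_trans zero_le_two h2) (le_trans (le_trans zero_le_two h2) he)) hee)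

theorem okLoopB_char (n d : Int) (h2 : 2 ≤ d) :
    okLoopB n d h2 = true ↔ ∀ e : Int, d ≤ e → e * e ≤ n → PySem.Int.mod n e ≠ 0 :=
  okLoopB_char_aux n (n + 1 - d).toNat d h2 le_rfl

theorem pnA_small {n : Int} (h : n < 2) : pnA n = true := by
  unfold pnA
  rw [PySem.List.pyRange_one_eq_nil (by omega)]
  simp

-- the two primality tests agree on every integer
theorem pn_eq_ok (n : Int) : pnA n = okB n := by
  by_cases h2 : n < 2
  · rw [pnA_small h2]
    unfold okB
    rw [if_pos h2]
  · rw [Bool.eq_iff_iff, pnA_char]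
    unfold okB
    rw [if_neg h2, okLoopB_char]
    constructor
    · intro H e he hee
      have h2e : 2 * e ≤ e * e := mul_le_mul_of_nonneg_right he (by omega)
      have hlt : e < n := by omega
      exact H e he hlt hee
    · intro H i h1 _ h3; exact H i h1 h3

-- lockstep: A's (x,y) walk from the middle and B's offset walk visit the same pairs
theorem loops_eq (n : Nat) : ∀ (m : Int) (k : Nat), loopAF (m - k) (m + k) n = loopBF m k n := by
  induction n with
  | zero => intro m k; rfl
  | succ n ih =>
    intro m k
    rw [loopAF, loopBF, pn_eq_ok, pn_eq_ok]
    by_cases hc : (okB (m - k) && okB (m + k)) = true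
    · rw [if_pos hc, if_pos hc]
    · rw [if_neg hc, if_neg hc]
      have e1 : m - (k : Int) - 1 = m - ((k + 1 : Nat) : Int) := by push_cast; ring
      have e2 : m + (k : Int) + 1 = m + ((k + 1 : Nat) : Int) := by push_cast; ring
      rw [e1, e2, ih]

-- ===== VERDICT (by name: the statement is the Claim_ definition above) =====
theorem GB_conjecture_spec : Claim_equal_GB_conjecture := by
  intro idx _
  unfold Spec_GB_conjecture GB_conjecture GB_conjecture_alt
  show (loopAF _ _ _).getD [] = (loopBF _ _ _).getD []
  have h := loops_eq (3 * (PySem.Int.truncdiv idx 2).toNat + 5) (PySem.Int.truncdiv idx 2) 0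
  simp only [Nat.cast_zero, sub_zero, add_zero] at h
  rw [h]
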